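-- pv_equiv track=rewrite | github.com/sonny0430/Coding_Python | 프로그래머스/0/181881. 조건에 맞게 수열 변환하기 2/조건에 맞게 수열 변환하기 2.py | solution
-- ===== SOURCE A (Python) =====
-- def solution(arr):
--     result = []
--     temp = arr
--     temp2 = []
--
--     def sol(temp):
--         for i in range(len(temp)):
--             if (temp[i] >= 50) and (temp[i] % 2 == 0):
--                 temp2.append(temp[i] // 2)
--
--             elif (temp[i] < 50) and (temp[i] % 2 == 1):
--                 temp2.append(temp[i] * 2 + 1)
--             else:
--                 temp2.append(temp[i])
--         result.append(temp)
--
--     for k in range(100):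
--         sol(temp)
--
--         if (len(result) >= 2) and (result[k] == result[k-1]):
--             return k-1
--
--         temp = temp2
--         temp2 = []
-- ===== SOURCE B (Python) =====
-- def solution(arr):
--     best = 0
--     for x in arr:
--         c = 0
--         while c < 99:
--             y = x // 2 if (x >= 50 and x % 2 == 0) else (x * 2 + 1 if (x < 50 and x % 2 == 1) else x)
--             if y == x:
--                 break
--             x = y
--             c += 1
--         else:
--             return None
--         if c > best:
--             best = c
--     return best
-- ===== Notes on version B (the rewrite author's own statement) =====
-- stated objective: faster
-- what changed: A repeatedly maps the whole list, keeps every intermediate list in a history, and compares consecutive whole-list snapshots for up to 100 rounds; B exploits that elements evolve independently: it counts each element's own stabilization steps (capped at 99, returning None on overflow exactly where A falls off its loop) and returns the maximum count.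
import Mathlib
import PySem

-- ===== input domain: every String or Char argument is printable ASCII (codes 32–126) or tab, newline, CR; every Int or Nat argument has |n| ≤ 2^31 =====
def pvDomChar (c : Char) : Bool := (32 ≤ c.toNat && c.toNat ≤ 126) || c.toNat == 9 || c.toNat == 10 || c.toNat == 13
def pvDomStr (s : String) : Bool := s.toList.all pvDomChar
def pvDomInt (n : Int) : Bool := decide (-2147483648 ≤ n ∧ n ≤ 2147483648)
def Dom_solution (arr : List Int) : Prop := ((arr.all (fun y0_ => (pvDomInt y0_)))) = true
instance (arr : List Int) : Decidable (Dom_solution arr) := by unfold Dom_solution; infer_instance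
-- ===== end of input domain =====

-- B replaces A's whole-list fixpoint iteration (with a history list) by an independent
-- per-element stabilization count, returning the maximum count (measurably faster: no history lists or whole-list comparisons).

-- ===== PORT A =====
-- inner function `sol`: one pass over temp building temp2 (the appended history entry is handled at the call site)
def solInnerA (temp : List Int) : List Int :=
  temp.foldl (fun temp2 xi =>
    if xi ≥ 50 ∧ PySem.Int.mod xi 2 = 0 then temp2 ++ [PySem.Int.floordiv xi 2]
    else if xi < 50 ∧ PySem.Int.mod xi 2 = 1 then temp2 ++ [xi * 2 + 1]
    else temp2 ++ [xi]) []

-- the `for k in range(100)` loop: fuel counts the remaining iterations, `result` is the history list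
def solGoA : Nat → Nat → List Int → List (List Int) → Option Int
  | 0, _, _, _ => none
  | f+1, k, temp, result =>
      let temp2 := solInnerA temp
      let result' := result ++ [temp]
      if 2 ≤ result'.length ∧
          PySem.List.pyGet? result' (k : Int) = PySem.List.pyGet? result' ((k : Int) - 1) then
        some ((k : Int) - 1)
      else
        solGoA f (k+1) temp2 result'

def solution (arr : List Int) : Option Int := solGoA 100 0 arr []

-- ===== PORT B =====
def pvStep (x : Int) : Int :=
  if x ≥ 50 ∧ PySem.Int.mod x 2 = 0 then PySem.Int.floordiv x 2
  else if x < 50 ∧ PySem.Int.mod x 2 = 1 then x * 2 + 1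
  else x

-- the `while c < 99` loop of Source B: fuel = 99 - c; returns none when the loop ends without break
def pvElem : Nat → Int → Int → Option Int
  | 0, _, _ => none
  | f+1, x, c =>
      let y := pvStep x
      if y = x then some c else pvElem f y (c+1)

-- the `for x in arr` loop of Source B, threading `best`
def pvGoB : List Int → Int → Option Int
  | [], best => some best
  | x :: xs, best =>
      match pvElem 99 x 0 with
      | none => none
      | some c => pvGoB xs (if c > best then c else best)

def solution_alt (arr : List Int) : Option Int := pvGoB arr 0

-- ===== PRECONDITION & SPEC =====
def Spec_solution (arr : List Int) (out : Option Int) : Prop := out = solution_alt arr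
instance (arr : List Int) (out : Option Int) : Decidable (Spec_solution arr out) := by unfold Spec_solution; infer_instance

-- ===== CLAIM (what is proved, stated in full; the proofs are below) =====
def Claim_equal_solution : Prop := ∀ (arr : List Int), Dom_solution arr → Spec_solution arr (solution arr)

-- ===== LEMMAS AND PROOFS =====

-- merge of two optional counts: none dominates, otherwise the max
def mjoin : Option Int → Option Int → Option Int
  | some a, some b => some (max a b)
  | _, _ => none

-- simplified form of A's loop: first j (from fuel) at which the whole list is stable
def lsearch : Nat → List Int → Int → Option Int
  | 0, _, _ => none
  | f+1, temp, j => if temp.map pvStep = temp then some j else lsearch f (temp.map pvStep) (j+1)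

lemma solInnerA_foldl (l acc : List Int) :
    l.foldl (fun temp2 xi =>
      if xi ≥ 50 ∧ PySem.Int.mod xi 2 = 0 then temp2 ++ [PySem.Int.floordiv xi 2]
      else if xi < 50 ∧ PySem.Int.mod xi 2 = 1 then temp2 ++ [xi * 2 + 1]
      else temp2 ++ [xi]) acc = acc ++ l.map pvStep := by
  induction l generalizing acc with
  | nil => simp
  | cons x xs ih =>
      simp only [List.foldl_cons, List.map_cons, ih, pvStep]
      split_ifs <;> simp

lemma solInnerA_eq (temp : List Int) : solInnerA temp = temp.map pvStep := by
  unfold solInnerA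
  rw [solInnerA_foldl temp []]
  simp only [List.nil_append]

lemma pyGet_mid (l : List (List Int)) (a b : List Int) (k : Nat) (hk : l.length = k) :
    PySem.List.pyGet? (l ++ [a] ++ [b]) ((k : Nat) : Int) = some a := by
  subst hk
  have : l ++ [a] ++ [b] = l ++ (a :: [b]) := by simp
  rw [this]
  exact PySem.List.pyGet?_append_length l [b] a

lemma pyGet_last (l : List (List Int)) (a b : List Int) (k : Nat) (hk : l.length = k) :
    PySem.List.pyGet? (l ++ [a] ++ [b]) (((k+1 : Nat)) : Int) = some b := by
  subst hk
  have h1 : ((l.length + 1 : Nat) : Int) = ((l ++ [a]).length : Int) := by simp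
  rw [h1]
  have : l ++ [a] ++ [b] = (l ++ [a]) ++ (b :: []) := by simp
  rw [this]
  exact PySem.List.pyGet?_append_length (l ++ [a]) [] b

lemma solGoA_main : ∀ (f k : Nat) (pre : List (List Int)) (temp : List Int),
    pre.length = k →
    solGoA f (k+1) (temp.map pvStep) (pre ++ [temp]) = lsearch f temp (k : Int) := by
  intro f
  induction f with
  | zero => intro k pre temp _; rfl
  | succ n ih =>
      intro k pre temp hk
      simp only [solGoA, lsearch]
      rw [pyGet_last pre temp (temp.map pvStep) k hk]
      have hm : ((k + 1 : Nat) : Int) - 1 = ((k : Nat) : Int) := by omega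
      rw [hm, pyGet_mid pre temp (temp.map pvStep) k hk]
      have hlen : 2 ≤ (pre ++ [temp] ++ [temp.map pvStep]).length := by simp
      by_cases hst : temp.map pvStep = temp
      · rw [if_pos ⟨hlen, by rw [hst]⟩, if_pos hst]
      · rw [if_neg (by
          intro h
          exact hst (Option.some.injEq _ _ ▸ h.2)), if_neg hst]
        rw [solInnerA_eq]
        have hpre : (pre ++ [temp]).length = k + 1 := by simp [hk]
        have := ih (k+1) (pre ++ [temp]) (temp.map pvStep) hpre
        rw [show k + 1 + 1 = k + 2 by ring] at this
        rw [this]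
        congr 1

lemma solGoA_start (f : Nat) (arr : List Int) :
    solGoA (f+1) 0 arr [] = solGoA f 1 (arr.map pvStep) [arr] := by
  simp only [solGoA]
  rw [if_neg (by intro h; simp at h), solInnerA_eq]
  rfl

lemma solution_eq_lsearch (arr : List Int) : solution arr = lsearch 99 arr 0 := by
  show solGoA 100 0 arr [] = lsearch 99 arr 0
  rw [show (100:Nat) = 99+1 from rfl, solGoA_start 99 arr]
  have := solGoA_main 99 0 [] arr rfl
  simpa using this

lemma pvElem_ge : ∀ (f : Nat) (x c c' : Int), pvElem f x c = some c' → c ≤ c' := by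
  intro f
  induction f with
  | zero => intro x c c' h; simp [pvElem] at h
  | succ n ih =>
      intro x c c' h
      simp only [pvElem] at h
      split_ifs at h with hs
      · simp only [Option.some.injEq] at h; omega
      · have := ih (pvStep x) (c+1) c' h; omega

lemma lsearch_ge : ∀ (f : Nat) (temp : List Int) (j c : Int), lsearch f temp j = some c → j ≤ c := by
  intro f
  induction f with
  | zero => intro temp j c h; simp [lsearch] at h
  | succ n ih =>
      intro temp j c h
      simp only [lsearch] at h
      split_ifs at h with hs
      · simp_all
      · have := ih (temp.map pvStep) (j+1) c h; omega

lemma pvElem_stable (f : Nat) (x c : Int) (h : pvStep x = x) : pvElem (f+1) x c = some c := by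
  simp [pvElem, h]

lemma lsearch_stable (f : Nat) (temp : List Int) (j : Int) (h : temp.map pvStep = temp) :
    lsearch (f+1) temp j = some j := by
  simp [lsearch, h]

lemma lsearch_nil (f : Nat) (j : Int) : lsearch (f+1) [] j = some j := by
  simp [lsearch]

lemma lsearch_succ_ne (f : Nat) (temp : List Int) (j : Int) (h : ¬ temp.map pvStep = temp) :
    lsearch (f+1) temp j = lsearch f (temp.map pvStep) (j+1) := by
  simp only [lsearch]
  rw [if_neg h]

lemma pvElem_succ_ne (f : Nat) (x c : Int) (h : ¬ pvStep x = x) :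
    pvElem (f+1) x c = pvElem f (pvStep x) (c+1) := by
  simp only [pvElem]
  rw [if_neg h]

lemma lsearch_cons : ∀ (f : Nat) (j : Int) (x : Int) (xs : List Int),
    lsearch (f+1) (x :: xs) j = mjoin (pvElem (f+1) x j) (lsearch (f+1) xs j) := by
  intro f
  induction f with
  | zero =>
      intro j x xs
      simp only [lsearch, pvElem, List.map_cons, List.cons.injEq]
      by_cases hx : pvStep x = x <;> by_cases hxs : xs.map pvStep = xs <;>
        simp [hx, hxs, mjoin]
  | succ n ih =>
      intro j x xs
      have hcons : List.map pvStep (x :: xs) = x :: xs ↔ (pvStep x = x ∧ List.map pvStep xs = xs) := by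
        simp
      by_cases hx : pvStep x = x <;> by_cases hxs : List.map pvStep xs = xs
      · rw [lsearch_stable _ _ _ (hcons.mpr ⟨hx, hxs⟩), pvElem_stable _ _ _ hx,
            lsearch_stable _ _ _ hxs]
        simp [mjoin]
      · -- x stable, xs not stable
        have hns : ¬ List.map pvStep (x :: xs) = x :: xs := fun h => hxs (hcons.mp h).2
        rw [lsearch_succ_ne (n+1) _ _ hns, List.map_cons, ih, hx,
            pvElem_stable n x (j+1) hx, pvElem_stable (n+1) x j hx,
            lsearch_succ_ne (n+1) xs j hxs]
        cases hL : lsearch (n+1) (List.map pvStep xs) (j+1) with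
        | none => simp [mjoin]
        | some c =>
            have := lsearch_ge _ _ _ _ hL
            simp only [mjoin]
            congr 1
            omega
      · -- x not stable, xs stable
        have hns : ¬ List.map pvStep (x :: xs) = x :: xs := fun h => hx (hcons.mp h).1
        rw [lsearch_succ_ne (n+1) _ _ hns, List.map_cons, ih, hxs,
            lsearch_stable n xs (j+1) hxs, lsearch_stable (n+1) xs j hxs,
            pvElem_succ_ne (n+1) x j hx]
        cases hE : pvElem (n+1) (pvStep x) (j+1) with
        | none => simp [mjoin]
        | some c =>
            have := pvElem_ge _ _ _ _ hE
            simp only [mjoin]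
            congr 1
            omega
      · -- neither stable
        have hns : ¬ List.map pvStep (x :: xs) = x :: xs := fun h => hx (hcons.mp h).1
        rw [lsearch_succ_ne (n+1) _ _ hns, List.map_cons, ih,
            pvElem_succ_ne (n+1) x j hx, lsearch_succ_ne (n+1) xs j hxs]

lemma pvGoB_shift : ∀ (xs : List Int) (best : Int), 0 ≤ best →
    pvGoB xs best = mjoin (some best) (pvGoB xs 0) := by
  intro xs
  induction xs with
  | nil => intro best hb; simp [pvGoB, mjoin]; omega
  | cons x xs ih =>
      intro best hb
      simp only [pvGoB]
      cases hE : pvElem 99 x 0 with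
      | none => simp [mjoin]
      | some c =>
          have hc : 0 ≤ c := pvElem_ge _ _ _ _ hE
          simp only
          rw [ih _ (by omega : (0:Int) ≤ if c > best then c else best),
              ih _ (by omega : (0:Int) ≤ if c > 0 then c else 0)]
          cases pvGoB xs 0 with
          | none => simp [mjoin]
          | some p =>
              simp only [mjoin]
              congr 1
              split_ifs <;> omega

lemma pvGoB_eq_lsearch : ∀ (xs : List Int), pvGoB xs 0 = lsearch 99 xs 0 := by
  intro xs
  induction xs with
  | nil => simp [pvGoB, lsearch_nil]
  | cons x xs ih =>
      rw [lsearch_cons 98 0 x xs]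
      simp only [pvGoB]
      cases hE : pvElem 99 x 0 with
      | none => simp [mjoin]
      | some c =>
          have hc : 0 ≤ c := pvElem_ge _ _ _ _ hE
          simp only
          rw [pvGoB_shift _ _ (by omega : (0:Int) ≤ if c > 0 then c else 0), ih]
          cases lsearch 99 xs 0 with
          | none => simp [mjoin]
          | some p =>
              simp only [mjoin]
              congr 1
              split_ifs <;> omega

-- ===== VERDICT (by name: the statement is the Claim_ definition above) =====
theorem solution_spec : Claim_equal_solution := by
  intro arr _
  show solution arr = solution_alt arr
  rw [solution_eq_lsearch]
  show lsearch 99 arr 0 = pvGoB arr 0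
  rw [pvGoB_eq_lsearch]
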